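-- pv_equiv track=rewrite | github.com/MrBrantCode/unitest_baseline | mut_generate/mist_train_taco/taco_15337/solution.py | calculate_greater_lesser_diff
-- ===== SOURCE A (Python) =====
-- from bisect import bisect, bisect_left
--
-- def calculate_greater_lesser_diff(arr, N):
--     output = []
--     left = []
--
--     # Calculate the count of numbers greater than the current element on the left
--     for item in arr:
--         i = bisect(left, item)
--         output.append(len(left) - i)
--         left.insert(i, item)
--
--     right = []
--
--     # Calculate the count of numbers less than the current element on the right
--     for (i, item) in enumerate(arr[::-1]):
--         j = bisect_left(right, item)
--         right.insert(j, item)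
--         output[-i - 1] = abs(output[-i - 1] - j)
--
--     return output
-- ===== SOURCE B (Python) =====
-- def calculate_greater_lesser_diff(arr, N):
--     res = []
--     for k in range(len(arr)):
--         g = sum(1 for x in arr[:k] if x > arr[k])
--         l = sum(1 for x in arr[k + 1:] if x < arr[k])
--         res.append(abs(g - l))
--     return res
-- ===== Notes on version B (the rewrite author's own statement) =====
-- stated objective: simpler
-- what changed: A maintains two bisect-sorted insertion lists and patches the output in a reversed second pass; B directly counts, for each index, the greater elements on its left and the lesser elements on its right and returns |difference| in one forward comprehension.
import Mathlib
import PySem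

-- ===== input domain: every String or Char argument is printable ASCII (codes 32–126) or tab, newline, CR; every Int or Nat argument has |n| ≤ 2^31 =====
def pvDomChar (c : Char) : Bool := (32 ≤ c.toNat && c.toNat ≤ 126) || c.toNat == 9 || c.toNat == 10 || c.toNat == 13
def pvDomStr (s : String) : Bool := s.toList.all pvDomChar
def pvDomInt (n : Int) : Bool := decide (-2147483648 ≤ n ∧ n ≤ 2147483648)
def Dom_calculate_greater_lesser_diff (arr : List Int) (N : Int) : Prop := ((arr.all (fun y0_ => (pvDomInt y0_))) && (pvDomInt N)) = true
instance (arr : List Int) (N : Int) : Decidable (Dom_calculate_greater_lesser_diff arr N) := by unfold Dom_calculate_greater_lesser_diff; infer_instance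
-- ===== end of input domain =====

-- B replaces A's two sorted-insertion (bisect) passes with one direct per-index count of
-- greater-on-left / lesser-on-right elements (objective: simpler; same O(n^2) cost).

-- ===== PORT A =====
-- bisect.bisect on a sorted list = number of elements ≤ x; `left`/`right` are maintained
-- sorted by construction, so these are exact here.
def pvBisect (l : List Int) (x : Int) : Nat := l.countP (fun y => decide (y ≤ x))
def pvBisectLeft (l : List Int) (x : Int) : Nat := l.countP (fun y => decide (y < x))

-- first loop: state (output, left)
def pvLoop1 : List Int → List Int → List Int → List Int × List Int
  | [], out, left => (out, left)
  | item :: rest, out, left =>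
      let i := pvBisect left item
      pvLoop1 rest (out ++ [((left.length : Int) - (i : Int))]) (PySem.List.insert left (i : Int) item)

-- second loop over enumerate(arr[::-1]); output[-i-1] = position len-1-i (i < len throughout)
def pvLoop2 : Nat → List Int → List Int → List Int → List Int
  | _, [], _right, out => out
  | i, item :: rest, right, out =>
      let j := pvBisectLeft right item
      let pos := out.length - 1 - i
      pvLoop2 (i + 1) rest (PySem.List.insert right ((j : Nat) : Int) item)
        (out.set pos (|out.getD pos 0 - (j : Int)|))

def calculate_greater_lesser_diff (arr : List Int) (N : Int) : List Int :=
  pvLoop2 0 arr.reverse [] (pvLoop1 arr [] []).1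

-- ===== PORT B =====
def calculate_greater_lesser_diff_alt (arr : List Int) (N : Int) : List Int :=
  (List.range arr.length).map (fun k =>
    let g := (arr.take k).countP (fun x => decide (x > arr.getD k 0))
    let l := (arr.drop (k + 1)).countP (fun x => decide (x < arr.getD k 0))
    |(g : Int) - (l : Int)|)

-- ===== PRECONDITION & SPEC =====
def Spec_calculate_greater_lesser_diff (arr : List Int) (N : Int) (out : List Int) : Prop := out = calculate_greater_lesser_diff_alt arr N
instance (arr : List Int) (N : Int) (out : List Int) : Decidable (Spec_calculate_greater_lesser_diff arr N out) := by unfold Spec_calculate_greater_lesser_diff; infer_instance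

-- ===== CLAIM (what is proved, stated in full; the proofs are below) =====
def Claim_equal_calculate_greater_lesser_diff : Prop := ∀ (arr : List Int) (N : Int), Dom_calculate_greater_lesser_diff arr N → Spec_calculate_greater_lesser_diff arr N (calculate_greater_lesser_diff arr N)

-- ===== LEMMAS AND PROOFS =====

lemma pv_countP_split (l : List Int) (x : Int) :
    l.countP (fun y => decide (x < y)) + l.countP (fun y => decide (y ≤ x)) = l.length := by
  induction l with
  | nil => simp
  | cons a t ih =>
      simp only [List.countP_cons, List.length_cons]
      by_cases h : a ≤ x <;> simp [h, not_lt.mpr, not_le.mp] <;> omega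

lemma pv_insert_perm (l : List Int) (i : Nat) (h : i ≤ l.length) (x : Int) :
    (PySem.List.insert l (i : Int) x).Perm (x :: l) := by
  rw [PySem.List.insert_natCast l i x h]
  have := List.perm_middle (a := x) (l₁ := l.take i) (l₂ := l.drop i)
  simpa [List.take_append_drop] using this

lemma pv_loop1_spec : ∀ (rest pre out left : List Int), left.Perm pre →
    (pvLoop1 rest out left).1 = out ++ (List.range rest.length).map (fun k =>
      (((pre ++ rest).take (pre.length + k)).countP
        (fun x => decide (x > (pre ++ rest).getD (pre.length + k) 0)) : Int)) := by
  intro rest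
  induction rest with
  | nil => intro pre out left _; simp [pvLoop1]
  | cons item rest ih =>
      intro pre out left hp
      have hlen : left.length = pre.length := hp.length_eq
      have hperm : (PySem.List.insert left ((pvBisect left item : Nat) : Int) item).Perm (pre ++ [item]) := by
        refine ((pv_insert_perm left _ ?_ item).trans (hp.cons item)).trans
          (List.perm_append_singleton item pre).symm
        exact List.countP_le_length
      have := ih (pre ++ [item]) (out ++ [((left.length : Int) - (pvBisect left item : Int))]) _ hperm
      rw [pvLoop1, this]
      have harr : (pre ++ [item]) ++ rest = pre ++ item :: rest := by simp
      rw [List.length_cons, List.range_succ_eq_map, List.map_cons, List.map_map]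
      have h0 : ((pre ++ item :: rest).take (pre.length + 0)).countP
          (fun x => decide (x > (pre ++ item :: rest).getD (pre.length + 0) 0))
          = pre.countP (fun x => decide (item < x)) := by
        have ht : (pre ++ item :: rest).take pre.length = pre := List.take_left
        have hg : (pre ++ item :: rest).getD pre.length 0 = item := by
          simp [List.getD]
        simp [ht]
      have hv : ((left.length : Int) - (pvBisect left item : Int))
          = (pre.countP (fun x => decide (item < x)) : Int) := by
        have := pv_countP_split pre item
        have hc : pvBisect left item = pre.countP (fun y => decide (y ≤ item)) := by
          simpa [pvBisect] using hp.countP_eq (fun y => decide (y ≤ item))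
        rw [hc, hlen]
        omega
      rw [List.append_assoc, List.singleton_append]
      congr 1
      congr 1
      · simp only [hv, h0]
      · apply List.map_congr_left
        intro k _
        have hk : (pre ++ [item]).length + k = pre.length + (k + 1) := by
          simp only [List.length_append, List.length_cons, List.length_nil]
          omega
        simp only [Function.comp_apply, harr, hk]

lemma pv_loop2_spec (arr : List Int) : ∀ (m : Nat) (right front back : List Int),
    m ≤ arr.length → front.length = m → front.length + back.length = arr.length →
    right.Perm (arr.drop m) →
    pvLoop2 (arr.length - m) ((arr.take m).reverse) right (front ++ back)
      = (front.mapIdx (fun k v =>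
          |v - ((arr.drop (k + 1)).countP (fun x => decide (x < arr.getD k 0)) : Int)|)) ++ back := by
  intro m
  induction m with
  | zero =>
      intro right front back _ hf _ _
      rw [List.eq_nil_of_length_eq_zero hf]
      simp [pvLoop2]
  | succ m ih =>
      intro right front back hm hf htot hperm
      have hmlt : m < arr.length := by omega
      have htake : (arr.take (m + 1)).reverse = arr[m] :: (arr.take m).reverse := by
        rw [List.take_succ]
        simp [List.getElem?_eq_getElem hmlt]
      -- split front at its last element
      have hfne : front ≠ [] := by intro h; rw [h] at hf; simp at hf
      obtain ⟨front', x, hfx⟩ : ∃ f' x, front = f' ++ [x] := by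
        refine ⟨front.dropLast, front.getLast hfne, ?_⟩
        simp [List.dropLast_append_getLast hfne]
      have hflen : front'.length = m := by
        have := hf; rw [hfx] at this; simp at this; omega
      have hitem : arr.getD m 0 = arr[m] := by simp [List.getD, List.getElem?_eq_getElem hmlt]
      have hj : pvBisectLeft right arr[m]
          = (arr.drop (m + 1)).countP (fun x => decide (x < arr.getD m 0)) := by
        rw [hitem]
        exact hperm.countP_eq (fun y => decide (y < arr[m]))
      have hpos : (front ++ back).length - 1 - (arr.length - (m + 1)) = m := by
        have : (front ++ back).length = arr.length := by simp; omega
        omega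
      have hget : (front ++ back).getD m 0 = x := by
        rw [hfx, List.append_assoc]
        have h1 : m < (front' ++ ([x] ++ back)).length := by simp; omega
        simp [List.getD,
          List.getElem_append_right (by omega : front'.length ≤ m), hflen]
      have hset : ∀ v : Int, (front ++ back).set m v = front' ++ (v :: back) := by
        intro v
        rw [hfx, List.append_assoc,
          List.set_append_right _ _ (by omega : front'.length ≤ m), hflen]
        simp
      have hsub : arr.length - (m + 1) + 1 = arr.length - m := by omega
      have hdrop : arr.drop m = arr[m] :: arr.drop (m + 1) := List.drop_eq_getElem_cons hmlt
      have hperm' : (PySem.List.insert right ((pvBisectLeft right arr[m] : Nat) : Int) arr[m]).Perm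
          (arr.drop m) := by
        rw [hdrop]
        exact (pv_insert_perm right _ List.countP_le_length arr[m]).trans (hperm.cons _)
      have hblen : front'.length + ((|x - ((pvBisectLeft right arr[m] : Nat) : Int)|) :: back).length
          = arr.length := by
        rw [hfx] at htot; simp at htot ⊢; omega
      rw [htake, pvLoop2]
      simp only [hpos, hget, hset, hsub]
      rw [ih _ front' _ (by omega) hflen hblen hperm']
      rw [hfx, List.mapIdx_append]
      simp [hflen, hj]

lemma pv_mapIdx_map_range (n : Nat) (g : Nat → Int) (f : Nat → Int → Int) :
    ((List.range n).map g).mapIdx f = (List.range n).map (fun k => f k (g k)) := by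
  apply List.ext_getElem
  · simp
  · intro i h1 h2
    simp

theorem pv_main (arr : List Int) (N : Int) :
    calculate_greater_lesser_diff arr N = calculate_greater_lesser_diff_alt arr N := by
  unfold calculate_greater_lesser_diff calculate_greater_lesser_diff_alt
  have h1 := pv_loop1_spec arr [] [] [] (List.Perm.refl [])
  simp only [List.nil_append, List.length_nil, Nat.zero_add] at h1
  rw [h1]
  have h2 := pv_loop2_spec arr arr.length []
    ((List.range arr.length).map (fun k =>
      ((arr.take k).countP (fun x => decide (x > arr.getD k 0)) : Int))) []
    (le_refl _) (by simp) (by simp) (by simp)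
  simp only [Nat.sub_self, List.take_length, List.append_nil] at h2
  rw [h2, pv_mapIdx_map_range]

-- ===== VERDICT (by name: the statement is the Claim_ definition above) =====
theorem calculate_greater_lesser_diff_spec : Claim_equal_calculate_greater_lesser_diff := by
  intro arr N _
  unfold Spec_calculate_greater_lesser_diff
  exact pv_main arr N
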